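-- pv_equiv track=rewrite | github.com/Wojtas2001/Algorithm-and-Data-Structures | sorting_algorithms/19-20zad1.py | pretty_sort
-- ===== SOURCE A (Python) =====
-- def preprocessing(T):
--
--     # ladna_tab = [False]*10
--     # nieladna_tab = [False]*10
--     occur = [0 ] *10
--     ladna = 0
--     nieladna = 0
--
--     for i in range(len(T)):
--         temp = T[i]
--         while temp > 0:
--             occur[temp % 10] += 1
--             temp //= 10
--
--         for j in range(len(occur)):
--             if occur[j] == 1:
--                 ladna += 1
--             elif occur[j] > 1:
--                 nieladna += 1
--
--
--             occur[j] = 0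
--
--         T[i] = (ladna, nieladna, T[i])
--         ladna = 0
--         nieladna = 0
--
--     return T
--
-- def countSort(A, j):
--     k = 10
--     C = [0] *k
--     B = [0] *len(A)
--     for i in range(len(A)):
--         C[A[i][j]] += 1
--
--     for i in range(1, k):
--         C[i] += C[i-1]
--
--     for i in range(len(A)-1, -1, -1):
--         C[A[i][j]] -= 1
--         B[C[A[i][j]]] = A[i]
--
--
--     for i in range(len(A)):
--         A[i] = B[i]
--
-- def pretty_sort(T):
--
--     T = preprocessing(T)
--     countSort(T, 1)
--     for i in range(len(T)//2):
--         T[i], T[len(T)-1-i] = T[len(T)-1-i], T[i]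
--
--     countSort(T, 0)
--
--     for i in range(len(T)//2):
--         T[i], T[len(T)-1-i] = T[len(T)-1-i], T[i]
--
--     for i in range(len(T)):
--         T[i] = T[i][2]
--
--     return T
-- ===== SOURCE B (Python) =====
-- def pretty_sort(T):
--     # Sort in place by (count of digits occurring exactly once) descending,
--     # then (count of digits occurring more than once) ascending; stable on ties.
--     def digits(n):
--         ds = []
--         while n > 0:
--             ds.append(n % 10)
--             n //= 10
--         return ds
--
--     def key(n):
--         ds = digits(n)
--         uniq = sum(1 for d in range(10) if ds.count(d) == 1)
--         rep = sum(1 for d in range(10) if ds.count(d) > 1)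
--         return (-uniq, rep)
--
--     T.sort(key=key)
--     return T
-- ===== Notes on version B (the rewrite author's own statement) =====
-- stated objective: simpler
-- what changed: A's pipeline (tuple-tagging preprocessing, two stable counting sorts over digit-count keys, two in-place reversal loops, tag stripping) is replaced by one stable comparison sort with key (-uniq, rep) computed per element from its digit list.
import Mathlib
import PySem

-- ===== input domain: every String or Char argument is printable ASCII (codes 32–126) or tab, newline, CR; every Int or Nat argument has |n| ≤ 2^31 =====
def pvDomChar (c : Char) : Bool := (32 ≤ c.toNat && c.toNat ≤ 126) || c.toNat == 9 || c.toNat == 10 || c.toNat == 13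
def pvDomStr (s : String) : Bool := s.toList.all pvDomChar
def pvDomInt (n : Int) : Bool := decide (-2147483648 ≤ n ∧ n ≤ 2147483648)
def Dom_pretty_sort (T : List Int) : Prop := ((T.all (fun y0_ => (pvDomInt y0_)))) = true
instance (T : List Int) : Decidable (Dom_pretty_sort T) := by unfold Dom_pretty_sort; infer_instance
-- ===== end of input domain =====

-- B replaces A's tagging + two counting sorts + two reversal loops by one stable comparison
-- sort on the key (-uniq, rep); both A and B sort the caller's list in place (the theorems
-- here are about the RETURN value).

-- ===== PORT A =====
-- while temp > 0: occur[temp % 10] += 1; temp //= 10   (the digit index is 0..9, so .toNat is exact)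
def pvADigitLoop (temp : Int) (occur : List Int) : List Int :=
  if _h : temp > 0 then
    pvADigitLoop (PySem.Int.floordiv temp 10)
      (occur.set (PySem.Int.mod temp 10).toNat (occur.getD (PySem.Int.mod temp 10).toNat 0 + 1))
  else occur
termination_by temp.toNat
decreasing_by
  have : PySem.Int.floordiv temp 10 = temp / 10 := PySem.Int.floordiv_eq_ediv_of_pos (by norm_num)
  omega

-- for j in range(len(occur)): if occur[j]==1: ladna+=1 elif occur[j]>1: nieladna+=1; occur[j]=0
def pvACountLoop (occur : List Int) : Int × Int :=
  let st := (List.range 10).foldl (fun (st : Int × Int × List Int) j =>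
    let l := if st.2.2.getD j 0 = 1 then st.1 + 1 else st.1
    let nl := if st.2.2.getD j 0 = 1 then st.2.1
              else if st.2.2.getD j 0 > 1 then st.2.1 + 1 else st.2.1
    (l, nl, st.2.2.set j 0)) (0, 0, occur)
  (st.1, st.2.1)

-- preprocessing: T[i] = (ladna, nieladna, T[i]); occur is reset to all zeros at the end of
-- each iteration's j-loop, so a fresh [0]*10 per element is exact
def pvAPreprocessing (T : List Int) : List (Int × Int × Int) :=
  T.map (fun t =>
    let c := pvACountLoop (pvADigitLoop t (List.replicate 10 0))
    (c.1, c.2, t))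

-- A[i][j]: tuple indexing, called with j = 0 or 1 only
def pvGetJ (x : Int × Int × Int) (j : Int) : Int :=
  if j = 0 then x.1 else if j = 1 then x.2.1 else x.2.2

-- countSort(A, j): inside Pre_ the keys are 0..9 (where a key reaches 10 Python raises
-- IndexError and the input is excluded by Pre_), so .toNat on the indices is exact there
def pvACountSort (A : List (Int × Int × Int)) (j : Int) : List (Int × Int × Int) :=
  let C0 := A.foldl (fun C x => C.set (pvGetJ x j).toNat (C.getD (pvGetJ x j).toNat 0 + 1))
    (List.replicate 10 0)
  let C1 := (List.range' 1 9).foldl (fun C i => C.set i (C.getD i 0 + C.getD (i - 1) 0)) C0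
  (A.foldr (fun x (st : List Int × List (Int × Int × Int)) =>
      let c := st.1.set (pvGetJ x j).toNat (st.1.getD (pvGetJ x j).toNat 0 - 1)
      (c, st.2.set (c.getD (pvGetJ x j).toNat 0).toNat x))
    (C1, List.replicate A.length (0, 0, 0))).2

-- for i in range(len(T)//2): T[i], T[len(T)-1-i] = T[len(T)-1-i], T[i]
def pvSwapLoop (l : List (Int × Int × Int)) : List (Int × Int × Int) :=
  (List.range (l.length / 2)).foldl (fun acc i =>
    let a := acc.getD i (0, 0, 0)
    let b := acc.getD (acc.length - 1 - i) (0, 0, 0)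
    (acc.set i b).set (acc.length - 1 - i) a) l

def pretty_sort (T : List Int) : List Int :=
  let T1 := pvAPreprocessing T
  let T2 := pvACountSort T1 1
  let T3 := pvSwapLoop T2
  let T4 := pvACountSort T3 0
  let T5 := pvSwapLoop T4
  T5.map (fun x => x.2.2)

-- ===== PORT B =====
-- ds = []; while n > 0: ds.append(n % 10); n //= 10
def pvBDigits (n : Int) : List Int :=
  if _h : n > 0 then PySem.Int.mod n 10 :: pvBDigits (PySem.Int.floordiv n 10) else []
termination_by n.toNat
decreasing_by
  have : PySem.Int.floordiv n 10 = n / 10 := PySem.Int.floordiv_eq_ediv_of_pos (by norm_num)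
  omega

-- sum(1 for d in range(10) if cond d) = countP cond (range 10)
def pvBUniq (n : Int) : Int :=
  ((List.range 10).countP (fun (d : Nat) => (pvBDigits n).count (d : Int) == 1) : Nat)

def pvBRep (n : Int) : Int :=
  ((List.range 10).countP (fun (d : Nat) => decide (1 < (pvBDigits n).count (d : Int))) : Nat)

def pretty_sort_alt (T : List Int) : List Int :=
  PySem.List.sorted2 T (fun n => -(pvBUniq n)) (fun n => pvBRep n) false

-- ===== PRECONDITION & SPEC =====
-- Pre_'s own digit-count helpers, independent of both ports; the fuel 11 covers every
-- integer of the stated domain (|n| <= 2^31 < 10^11), on which they agree with the ports' digit loops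
def pvPreDigits : Nat → Int → List Int
  | 0, _ => []
  | f + 1, n =>
    if n > 0 then PySem.Int.mod n 10 :: pvPreDigits f (PySem.Int.floordiv n 10) else []

def pvPreUniq (n : Int) : Int :=
  ((List.range 10).countP (fun (d : Nat) => (pvPreDigits 11 n).count (d : Int) == 1) : Nat)

def pvPreRep (n : Int) : Int :=
  ((List.range 10).countP (fun (d : Nat) => decide (1 < (pvPreDigits 11 n).count (d : Int))) : Nat)

-- A raises IndexError exactly when some element's digit-count key reaches 10 (its ten digits
-- 0-9 each occur exactly once, or ten digits are repeated); Pre_ excludes exactly those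
-- inputs, on which A returns nothing.
def Pre_pretty_sort (T : List Int) : Prop :=
  ∀ n ∈ T, pvPreUniq n ≠ 10 ∧ pvPreRep n ≠ 10
instance (T : List Int) : Decidable (Pre_pretty_sort T) := by unfold Pre_pretty_sort; infer_instance

def pvWitness_pretty_sort : List Int := [21, 7, 0, -3, 100]

def Spec_pretty_sort (T : List Int) (out : List Int) : Prop := out = pretty_sort_alt T
instance (T : List Int) (out : List Int) : Decidable (Spec_pretty_sort T out) := by
  unfold Spec_pretty_sort; infer_instance

-- ===== CLAIM (what is proved, stated in full; the proofs are below) =====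
def Claim_equal_pretty_sort : Prop :=
  ∀ (T : List Int), Dom_pretty_sort T → Pre_pretty_sort T → Spec_pretty_sort T (pretty_sort T)

-- ===== LEMMAS AND PROOFS =====

theorem pvSwap_aux (l : List (Int × Int × Int)) (k : Nat) (hk : k ≤ l.length / 2) :
    ((List.range k).foldl (fun acc i =>
      let a := acc.getD i (0, 0, 0)
      let b := acc.getD (acc.length - 1 - i) (0, 0, 0)
      (acc.set i b).set (acc.length - 1 - i) a) l).length = l.length ∧
    ∀ i, i < l.length →
      ((List.range k).foldl (fun acc i =>
        let a := acc.getD i (0, 0, 0)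
        let b := acc.getD (acc.length - 1 - i) (0, 0, 0)
        (acc.set i b).set (acc.length - 1 - i) a) l).getD i (0,0,0) =
      if i < k ∨ l.length - k ≤ i then l.getD (l.length - 1 - i) (0,0,0) else l.getD i (0,0,0) := by
  induction k with
  | zero =>
    refine ⟨rfl, fun i hi => ?_⟩
    rw [if_neg (by omega)]
    rfl
  | succ k ih =>
    obtain ⟨ihl, ihg⟩ := ih (le_trans (Nat.le_succ k) hk)
    rw [List.range_succ, List.foldl_append]
    set acc := (List.range k).foldl _ l with hacc
    constructor
    · simp [ihl]
    · intro i hi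
      have hk2 : 2 * k + 2 ≤ l.length := by omega
      simp only [List.foldl_cons, List.foldl_nil, ihl]
      have hne : k ≠ l.length - 1 - k := by omega
      have ha : acc.getD k (0,0,0) = l.getD k (0,0,0) := by
        rw [ihg k (by omega)]; simp; omega
      have hb : acc.getD (l.length - 1 - k) (0,0,0) = l.getD (l.length - 1 - k) (0,0,0) := by
        rw [ihg _ (by omega)]
        have : ¬ (l.length - 1 - k < k ∨ l.length - k ≤ l.length - 1 - k) := by omega
        rw [if_neg this]
      simp only [List.getD_eq_getElem?_getD]
      by_cases h1 : i = l.length - 1 - k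
      · subst h1
        rw [List.getElem?_set_self (by simp [ihl]; omega)]
        rw [if_pos (by omega)]
        simp only [List.getD_eq_getElem?_getD] at ha
        have : l.length - 1 - (l.length - 1 - k) = k := by omega
        rw [this]; simpa using ha
      · rw [List.getElem?_set_ne (by omega)]
        by_cases h2 : i = k
        · subst h2
          rw [List.getElem?_set_self (by omega)]
          rw [if_pos (by omega)]
          simp only [List.getD_eq_getElem?_getD] at hb
          simpa using hb
        · rw [List.getElem?_set_ne (by omega)]
          have := ihg i hi
          simp only [List.getD_eq_getElem?_getD] at this
          rw [this]
          by_cases h3 : i < k ∨ l.length - k ≤ i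
          · rw [if_pos h3, if_pos (by omega)]
          · rw [if_neg h3, if_neg (by omega)]

theorem pvSwapLoop_eq_reverse (l : List (Int × Int × Int)) : pvSwapLoop l = l.reverse := by
  obtain ⟨hl, hg⟩ := pvSwap_aux l (l.length / 2) le_rfl
  have hlen : (pvSwapLoop l).length = l.length := hl
  apply List.ext_getElem (by rw [hlen, List.length_reverse])
  intro i h1 h2
  have hi : i < l.length := by rwa [hlen] at h1
  have key : (pvSwapLoop l).getD i (0,0,0) =
      if i < l.length / 2 ∨ l.length - l.length / 2 ≤ i then l.getD (l.length - 1 - i) (0,0,0)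
      else l.getD i (0,0,0) := hg i hi
  rw [List.getD_eq_getElem?_getD, List.getElem?_eq_getElem h1, Option.getD_some] at key
  rw [key, List.getElem_reverse]
  by_cases h3 : i < l.length / 2 ∨ l.length - l.length / 2 ≤ i
  · rw [if_pos h3, List.getD_eq_getElem?_getD, List.getElem?_eq_getElem (by omega)]
    simp
  · rw [if_neg h3, List.getD_eq_getElem?_getD, List.getElem?_eq_getElem (by omega)]
    simp only [Option.getD_some]
    congr 1
    omega

theorem pvBDigits_pos {n : Int} (h : n > 0) :
    pvBDigits n = PySem.Int.mod n 10 :: pvBDigits (PySem.Int.floordiv n 10) := by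
  conv_lhs => rw [pvBDigits]
  rw [dif_pos h]

theorem pvBDigits_nonpos {n : Int} (h : ¬ n > 0) : pvBDigits n = [] := by
  conv_lhs => rw [pvBDigits]
  rw [dif_neg h]

-- the digit loop adds each digit's multiplicity into the 10-slot table
theorem pvADigitLoop_spec (t : Int) (occ : List Int) (hocc : occ.length = 10) :
    (pvADigitLoop t occ).length = 10 ∧
    ∀ d : Nat, d < 10 →
      (pvADigitLoop t occ).getD d 0 = occ.getD d 0 + ((pvBDigits t).count (d : Int) : Int) := by
  fun_induction pvADigitLoop t occ with
  | case1 t occ h ih =>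
    have hm0 : 0 ≤ PySem.Int.mod t 10 := PySem.Int.mod_nonneg t (by norm_num)
    have hm9 : PySem.Int.mod t 10 < 10 := PySem.Int.mod_lt t (by norm_num)
    obtain ⟨ihl, ihg⟩ := ih (by simp [hocc])
    refine ⟨ihl, fun d hd => ?_⟩
    rw [ihg d hd]
    rw [pvBDigits_pos h, List.count_cons]
    by_cases he : (PySem.Int.mod t 10).toNat = d
    · have : PySem.Int.mod t 10 = (d : Int) := by omega
      rw [← he]
      rw [List.getD_eq_getElem?_getD, List.getElem?_set_self (by omega), Option.getD_some,
        List.getD_eq_getElem?_getD]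
      simp [this]
      split_ifs <;> omega
    · have this2 : ¬ ((d : Int) = PySem.Int.mod t 10) := by omega
      rw [List.getD_eq_getElem?_getD, List.getElem?_set_ne he, ← List.getD_eq_getElem?_getD]
      simp [this2]
      rw [show PySem.Int.mod t 10 = t % 10 from PySem.Int.mod_eq_emod_of_pos (by norm_num)] at he
      omega
  | case2 t occ h =>
    refine ⟨hocc, fun d hd => ?_⟩
    rw [pvBDigits_nonpos h]
    simp

theorem pvACountLoopFold (js : List Nat) (hnd : js.Nodup) : ∀ (occ : List Int) (l nl : Int),
    ((js.foldl (fun (st : Int × Int × List Int) j =>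
      let l := if st.2.2.getD j 0 = 1 then st.1 + 1 else st.1
      let nl := if st.2.2.getD j 0 = 1 then st.2.1
                else if st.2.2.getD j 0 > 1 then st.2.1 + 1 else st.2.1
      (l, nl, st.2.2.set j 0)) (l, nl, occ)).1
        = l + (js.countP (fun j => decide (occ.getD j 0 = 1)) : Nat)) ∧
    ((js.foldl (fun (st : Int × Int × List Int) j =>
      let l := if st.2.2.getD j 0 = 1 then st.1 + 1 else st.1
      let nl := if st.2.2.getD j 0 = 1 then st.2.1
                else if st.2.2.getD j 0 > 1 then st.2.1 + 1 else st.2.1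
      (l, nl, st.2.2.set j 0)) (l, nl, occ)).2.1
        = nl + (js.countP (fun j => decide (1 < occ.getD j 0)) : Nat)) := by
  induction js with
  | nil => intro occ l nl; simp
  | cons j rest ih =>
    intro occ l nl
    have hj : j ∉ rest := (List.nodup_cons.mp hnd).1
    have hnd' : rest.Nodup := (List.nodup_cons.mp hnd).2
    have hsame : ∀ j' ∈ rest, (occ.set j 0).getD j' 0 = occ.getD j' 0 := by
      intro j' hj'
      rw [List.getD_eq_getElem?_getD,
        List.getElem?_set_ne (by rintro rfl; exact hj hj'),
        ← List.getD_eq_getElem?_getD]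
    have hc1 : rest.countP (fun j' => decide ((occ.set j 0).getD j' 0 = 1)) =
        rest.countP (fun j' => decide (occ.getD j' 0 = 1)) :=
      List.countP_congr (fun j' hj' => by rw [hsame j' hj'])
    have hc2 : rest.countP (fun j' => decide (1 < (occ.set j 0).getD j' 0)) =
        rest.countP (fun j' => decide (1 < occ.getD j' 0)) :=
      List.countP_congr (fun j' hj' => by rw [hsame j' hj'])
    obtain ⟨ih1, ih2⟩ := ih hnd' (occ.set j 0)
      (if occ.getD j 0 = 1 then l + 1 else l)
      (if occ.getD j 0 = 1 then nl else if occ.getD j 0 > 1 then nl + 1 else nl)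
    constructor
    · rw [List.foldl_cons]
      refine (ih1).trans ?_
      rw [hc1, List.countP_cons]
      simp only [List.getD_eq_getElem?_getD]
      split_ifs <;> (simp only [decide_eq_true_eq] at *) <;> push_cast <;> omega
    · rw [List.foldl_cons]
      refine (ih2).trans ?_
      rw [hc2, List.countP_cons]
      simp only [List.getD_eq_getElem?_getD]
      split_ifs <;> (simp only [decide_eq_true_eq] at *) <;> push_cast <;> omega

theorem pvAPreprocessing_eq (T : List Int) :
    pvAPreprocessing T = T.map (fun t => (pvBUniq t, pvBRep t, t)) := by
  unfold pvAPreprocessing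
  apply List.map_congr_left
  intro t _
  obtain ⟨hlen, hget⟩ := pvADigitLoop_spec t (List.replicate 10 0) (by simp)
  set occ := pvADigitLoop t (List.replicate 10 0) with hocc
  have hget' : ∀ d : Nat, d < 10 → occ.getD d 0 = ((pvBDigits t).count (d : Int) : Int) := by
    intro d hd
    rw [hget d hd, List.getD_eq_getElem?_getD, List.getElem?_replicate, if_pos hd]
    simp
  obtain ⟨h1, h2⟩ := pvACountLoopFold (List.range 10) (List.nodup_range) occ 0 0
  have e1 : (List.range 10).countP (fun j => decide (occ.getD j 0 = 1)) =
      (List.range 10).countP (fun (d : Nat) => (pvBDigits t).count (d : Int) == 1) := by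
    apply List.countP_congr
    intro j hj
    rw [hget' j (List.mem_range.mp hj)]
    simp
  have e2 : (List.range 10).countP (fun j => decide (1 < occ.getD j 0)) =
      (List.range 10).countP (fun (d : Nat) => decide (1 < (pvBDigits t).count (d : Int))) := by
    apply List.countP_congr
    intro j hj
    rw [hget' j (List.mem_range.mp hj)]
    simp
  unfold pvACountLoop
  simp only
  refine Prod.ext ?_ (Prod.ext ?_ rfl)
  · simp only at h1
    rw [h1, e1, pvBUniq]
    push_cast
    ring
  · simp only at h2
    rw [h2, e2, pvBRep]
    push_cast
    ring

def pvKeyN (j : Int) (x : Int × Int × Int) : Nat := (pvGetJ x j).toNat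
def pvCnt (j : Int) (A : List (Int × Int × Int)) (v : Nat) : Nat :=
  A.countP (fun x => pvKeyN j x == v)
def pvSN (j : Int) (A : List (Int × Int × Int)) (v : Nat) : Nat :=
  ((List.range v).map (pvCnt j A)).sum

theorem pvSN_succ (j A v) : pvSN j A (v + 1) = pvSN j A v + pvCnt j A v := by
  unfold pvSN
  rw [List.range_succ, List.map_append, List.sum_append]
  simp

theorem pvSN_mono (j A) {v w : Nat} (h : v ≤ w) : pvSN j A v ≤ pvSN j A w := by
  induction w with
  | zero =>
    have hv : v = 0 := by omega
    subst hv; exact le_rfl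
  | succ w ih =>
    rcases Nat.lt_or_ge v (w+1) with h1 | h1
    · have := ih (by omega)
      rw [pvSN_succ]
      rcases Nat.lt_or_ge v w with h2 | h2
      · omega
      · have : v = w := by omega
        subst this; omega
    · have : v = w + 1 := by omega
      subst this; omega

theorem pvInd_sum (u : Nat) : ∀ m : Nat,
    ((List.range m).map (fun d => if u = d then 1 else 0)).sum = if u < m then 1 else 0 := by
  intro m
  induction m with
  | zero => simp
  | succ m ih =>
    rw [List.range_succ, List.map_append, List.sum_append, ih]
    simp only [List.map_cons, List.map_nil, List.sum_cons, List.sum_nil]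
    split_ifs <;> omega

theorem pvSN_total (j : Int) (A : List (Int × Int × Int)) (hk : ∀ x ∈ A, pvKeyN j x < 10) :
    pvSN j A 10 = A.length := by
  induction A with
  | nil =>
    simp [pvSN, show pvCnt j [] = fun _ => 0 from funext (fun d => by simp [pvCnt])]
  | cons x t ih =>
    have hx : pvKeyN j x < 10 := hk x List.mem_cons_self
    have ih' := ih (fun y hy => hk y (List.mem_cons_of_mem x hy))
    unfold pvSN at *
    have hcnt : ∀ d, pvCnt j (x :: t) d = pvCnt j t d + (if pvKeyN j x = d then 1 else 0) := by
      intro d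
      unfold pvCnt
      rw [List.countP_cons]
      by_cases h : pvKeyN j x = d <;> simp [h]
    have : (List.range 10).map (pvCnt j (x :: t)) =
        (List.range 10).map (fun d => pvCnt j t d + (if pvKeyN j x = d then 1 else 0)) :=
      List.map_congr_left (fun d _ => hcnt d)
    rw [this]
    have : ((List.range 10).map (fun d => pvCnt j t d + (if pvKeyN j x = d then 1 else 0))).sum =
        ((List.range 10).map (pvCnt j t)).sum +
        ((List.range 10).map (fun d => if pvKeyN j x = d then 1 else 0)).sum := by
      induction (List.range 10) with
      | nil => simp
      | cons a l ihh => simp [ihh]; ring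
    rw [this, pvInd_sum, if_pos hx, ih']
    simp

-- stage 1: the counting fold tallies the keys
theorem pvCS_counts (j : Int) : ∀ (A : List (Int × Int × Int)) (C : List Int),
    (∀ x ∈ A, pvKeyN j x < C.length) →
    ((A.foldl (fun C x => C.set (pvGetJ x j).toNat (C.getD (pvGetJ x j).toNat 0 + 1)) C).length
        = C.length ∧
     ∀ d : Nat, (A.foldl (fun C x => C.set (pvGetJ x j).toNat (C.getD (pvGetJ x j).toNat 0 + 1)) C).getD d 0
        = C.getD d 0 + (pvCnt j A d : Int)) := by
  intro A
  induction A with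
  | nil =>
    intro C _
    refine ⟨rfl, fun d => ?_⟩
    simp [pvCnt]
  | cons x t ih =>
    intro C hk
    have hx : pvKeyN j x < C.length := hk x List.mem_cons_self
    set C' := C.set (pvGetJ x j).toNat (C.getD (pvGetJ x j).toNat 0 + 1) with hC'
    have hC'len : C'.length = C.length := by simp [hC']
    obtain ⟨ih1, ih2⟩ := ih C' (by rw [hC'len]; exact fun y hy => hk y (List.mem_cons_of_mem x hy))
    rw [List.foldl_cons]
    refine ⟨by rw [ih1, hC'len], fun d => ?_⟩
    rw [ih2 d]
    have hcnt : (pvCnt j (x :: t) d : Int) = (pvCnt j t d : Int) + (if pvKeyN j x = d then 1 else 0) := by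
      unfold pvCnt
      rw [List.countP_cons]
      by_cases h : pvKeyN j x = d <;> simp [h]
    rw [hcnt]
    by_cases h : pvKeyN j x = d
    · rw [if_pos h]
      have : C'.getD d 0 = C.getD d 0 + 1 := by
        rw [hC', List.getD_eq_getElem?_getD, ← h]
        rw [show (pvGetJ x j).toNat = pvKeyN j x from rfl] at *
        rw [List.getElem?_set_self (by omega), Option.getD_some]
      rw [this]; ring
    · rw [if_neg h]
      have : C'.getD d 0 = C.getD d 0 := by
        rw [hC', List.getD_eq_getElem?_getD,
          List.getElem?_set_ne (by rw [show (pvGetJ x j).toNat = pvKeyN j x from rfl]; exact h),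
          ← List.getD_eq_getElem?_getD]
      rw [this]; ring

-- stage 2: the prefix-sum fold
theorem pvCS_prefix (C0 : List Int) (hC0 : C0.length = 10) : ∀ m : Nat, m ≤ 9 →
    (((List.range' 1 m).foldl (fun C i => C.set i (C.getD i 0 + C.getD (i - 1) 0)) C0).length = 10 ∧
     ∀ i : Nat, i < 10 →
      ((List.range' 1 m).foldl (fun C i => C.set i (C.getD i 0 + C.getD (i - 1) 0)) C0).getD i 0
        = if i ≤ m then ((List.range (i+1)).map (fun d => C0.getD d 0)).sum else C0.getD i 0) := by
  intro m
  induction m with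
  | zero =>
    intro _
    refine ⟨hC0, fun i hi => ?_⟩
    by_cases h : i ≤ 0
    · have : i = 0 := by omega
      subst this
      simp
    · rw [if_neg h]
      rfl
  | succ m ih =>
    intro hm
    obtain ⟨ih1, ih2⟩ := ih (by omega)
    rw [List.range'_concat]
    set P := (List.range' 1 m).foldl (fun C i => C.set i (C.getD i 0 + C.getD (i - 1) 0)) C0 with hP
    rw [List.foldl_append, List.foldl_cons, List.foldl_nil]
    have hstep : 1 + 1 * m = m + 1 := by omega
    rw [hstep]
    refine ⟨by rw [List.length_set]; exact ih1, fun i hi => ?_⟩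
    have hm1 : P.getD (m + 1) 0 = C0.getD (m + 1) 0 := by
      rw [ih2 (m+1) (by omega), if_neg (by omega)]
    have hm2 : P.getD (m + 1 - 1) 0 = ((List.range (m+1)).map (fun d => C0.getD d 0)).sum := by
      simp only [Nat.add_sub_cancel]
      rw [ih2 m (by omega), if_pos (by omega)]
    by_cases h : i = m + 1
    · subst h
      rw [List.getD_eq_getElem?_getD, List.getElem?_set_self (by rw [ih1]; omega), Option.getD_some]
      rw [if_pos (by omega), hm1, hm2]
      rw [List.range_succ (n := m + 1), List.map_append, List.sum_append]
      simp
      ring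
    · rw [List.getD_eq_getElem?_getD, List.getElem?_set_ne (by omega), ← List.getD_eq_getElem?_getD]
      rw [ih2 i hi]
      by_cases h2 : i ≤ m
      · rw [if_pos h2, if_pos (by omega)]
      · rw [if_neg h2, if_neg (by omega)]

-- stage 3: the backward placement loop scatters each key-v block, in order, into
-- positions [C v - cnt v, C v)
theorem pvCS_scatter (j : Int) (C : List Int) (B : List (Int × Int × Int))
    (hC : C.length = 10) :
    ∀ s : List (Int × Int × Int),
    (∀ x ∈ s, pvKeyN j x < 10) →
    (∀ v : Nat, v < 10 → (pvCnt j s v : Int) ≤ C.getD v 0) →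
    (∀ v : Nat, v < 10 → C.getD v 0 ≤ (B.length : Int)) →
    (∀ v w : Nat, v < w → w < 10 → C.getD v 0 ≤ C.getD w 0 - (pvCnt j s w : Int)) →
    ((s.foldr (fun x (st : List Int × List (Int × Int × Int)) =>
        let c := st.1.set (pvGetJ x j).toNat (st.1.getD (pvGetJ x j).toNat 0 - 1)
        (c, st.2.set (c.getD (pvGetJ x j).toNat 0).toNat x)) (C, B)).1.length = 10 ∧
     (s.foldr (fun x (st : List Int × List (Int × Int × Int)) =>
        let c := st.1.set (pvGetJ x j).toNat (st.1.getD (pvGetJ x j).toNat 0 - 1)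
        (c, st.2.set (c.getD (pvGetJ x j).toNat 0).toNat x)) (C, B)).2.length = B.length ∧
     (∀ v : Nat, v < 10 →
        (s.foldr (fun x (st : List Int × List (Int × Int × Int)) =>
          let c := st.1.set (pvGetJ x j).toNat (st.1.getD (pvGetJ x j).toNat 0 - 1)
          (c, st.2.set (c.getD (pvGetJ x j).toNat 0).toNat x)) (C, B)).1.getD v 0
          = C.getD v 0 - (pvCnt j s v : Int)) ∧
     (∀ v : Nat, v < 10 → ∀ i : Nat,
        C.getD v 0 - (pvCnt j s v : Int) ≤ (i : Int) → (i : Int) < C.getD v 0 →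
        (s.foldr (fun x (st : List Int × List (Int × Int × Int)) =>
          let c := st.1.set (pvGetJ x j).toNat (st.1.getD (pvGetJ x j).toNat 0 - 1)
          (c, st.2.set (c.getD (pvGetJ x j).toNat 0).toNat x)) (C, B)).2.getD i (0,0,0)
          = (s.filter (fun x => pvKeyN j x == v)).getD
              (i - (C.getD v 0 - (pvCnt j s v : Int)).toNat) (0,0,0)) ∧
     (∀ i : Nat,
        (∀ v : Nat, v < 10 → ¬(C.getD v 0 - (pvCnt j s v : Int) ≤ (i : Int) ∧ (i : Int) < C.getD v 0)) →
        (s.foldr (fun x (st : List Int × List (Int × Int × Int)) =>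
          let c := st.1.set (pvGetJ x j).toNat (st.1.getD (pvGetJ x j).toNat 0 - 1)
          (c, st.2.set (c.getD (pvGetJ x j).toNat 0).toNat x)) (C, B)).2.getD i (0,0,0)
          = B.getD i (0,0,0))) := by
  intro s
  induction s with
  | nil =>
    intro _ _ _ _
    refine ⟨hC, rfl, fun v hv => by simp [pvCnt], fun v hv i h1 h2 => ?_, fun i _ => rfl⟩
    exfalso
    simp [pvCnt] at h1 h2
    omega
  | cons x t ih =>
    intro hk hge hub hdisj
    have hx : pvKeyN j x < 10 := hk x List.mem_cons_self
    have hcnt : ∀ v, pvCnt j (x :: t) v = pvCnt j t v + (if pvKeyN j x = v then 1 else 0) := by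
      intro v
      unfold pvCnt
      rw [List.countP_cons]
      by_cases h : pvKeyN j x = v <;> simp [h]
    obtain ⟨ih1, ih2, ihC, ihBlk, ihUn⟩ := ih
      (fun y hy => hk y (List.mem_cons_of_mem x hy))
      (fun v hv => le_trans (by rw [hcnt v]; split_ifs <;> push_cast <;> omega) (hge v hv))
      hub
      (fun v w hvw hw => le_trans (hdisj v w hvw hw)
        (by rw [hcnt w]; split_ifs <;> push_cast <;> omega))
    rw [List.foldr_cons]
    set r := (t.foldr (fun x (st : List Int × List (Int × Int × Int)) =>
        let c := st.1.set (pvGetJ x j).toNat (st.1.getD (pvGetJ x j).toNat 0 - 1)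
        (c, st.2.set (c.getD (pvGetJ x j).toNat 0).toNat x)) (C, B)) with hr
    simp only
    -- the position written for x
    have hkey : (pvGetJ x j).toNat = pvKeyN j x := rfl
    have hrk : r.1.getD (pvKeyN j x) 0 = C.getD (pvKeyN j x) 0 - (pvCnt j t (pvKeyN j x) : Int) :=
      ihC _ hx
    have hcx : pvCnt j (x :: t) (pvKeyN j x) = pvCnt j t (pvKeyN j x) + 1 := by
      rw [hcnt]; simp
    have hp : (r.1.set (pvGetJ x j).toNat (r.1.getD (pvGetJ x j).toNat 0 - 1)).getD (pvGetJ x j).toNat 0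
        = C.getD (pvKeyN j x) 0 - (pvCnt j (x :: t) (pvKeyN j x) : Int) := by
      rw [hkey, List.getD_eq_getElem?_getD, List.getElem?_set_self (by rw [ih1]; exact hx),
        Option.getD_some, hrk, hcx]
      push_cast
      ring
    have hge_x := hge (pvKeyN j x) hx
    have hp0 : 0 ≤ C.getD (pvKeyN j x) 0 - (pvCnt j (x :: t) (pvKeyN j x) : Int) := by omega
    have hpB : C.getD (pvKeyN j x) 0 - (pvCnt j (x :: t) (pvKeyN j x) : Int) < (B.length : Int) := by
      have := hub (pvKeyN j x) hx
      rw [hcx]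
      push_cast
      omega
    refine ⟨?_, ?_, ?_, ?_, ?_⟩
    · rw [List.length_set, ih1]
    · rw [List.length_set, ih2]
    · intro v hv
      by_cases h : v = pvKeyN j x
      · subst h
        exact hp
      · rw [List.getD_eq_getElem?_getD,
          List.getElem?_set_ne (show (pvGetJ x j).toNat ≠ v from fun e => h (e.symm.trans hkey)),
          ← List.getD_eq_getElem?_getD, ihC v hv, hcnt v, if_neg (fun e => h e.symm)]
        simp
    · intro v hv i hi1 hi2
      rw [hp]
      have hcast : ((C.getD (pvKeyN j x) 0 - (pvCnt j (x :: t) (pvKeyN j x) : Int)).toNat : Int)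
          = C.getD (pvKeyN j x) 0 - (pvCnt j (x :: t) (pvKeyN j x) : Int) := Int.toNat_of_nonneg hp0
      by_cases hvx : v = pvKeyN j x
      · subst hvx
        have hfil : (x :: t).filter (fun y => pvKeyN j y == (pvKeyN j x)) = x :: t.filter (fun y => pvKeyN j y == (pvKeyN j x)) := by
          rw [List.filter_cons_of_pos (by simp)]
        by_cases hip : (i : Int) = C.getD (pvKeyN j x) 0 - (pvCnt j (x :: t) (pvKeyN j x) : Int)
        · have hiN : i = (C.getD (pvKeyN j x) 0 - (pvCnt j (x :: t) (pvKeyN j x) : Int)).toNat := by omega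
          rw [← hiN, List.getD_eq_getElem?_getD,
            List.getElem?_set_self (by rw [ih2]; omega), Option.getD_some, hfil,
            hiN, Nat.sub_self, List.getD_cons_zero]
        · have hne : i ≠ (C.getD (pvKeyN j x) 0 - (pvCnt j (x :: t) (pvKeyN j x) : Int)).toNat := by omega
          rw [List.getD_eq_getElem?_getD, List.getElem?_set_ne (fun e => hne e.symm),
            ← List.getD_eq_getElem?_getD]
          have hsx : (pvCnt j (x :: t) (pvKeyN j x) : Int) = (pvCnt j t (pvKeyN j x) : Int) + 1 := by
            rw [hcx]; push_cast; ring
          have ht1 : C.getD (pvKeyN j x) 0 - (pvCnt j t (pvKeyN j x) : Int) ≤ (i : Int) := by omega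
          rw [ihBlk (pvKeyN j x) hv i ht1 hi2, hfil]
          have hct : ((C.getD (pvKeyN j x) 0 - (pvCnt j t (pvKeyN j x) : Int)).toNat : Int) = C.getD (pvKeyN j x) 0 - (pvCnt j t (pvKeyN j x) : Int) := by
            have := hge (pvKeyN j x) hv
            omega
          have hidx : i - (C.getD (pvKeyN j x) 0 - (pvCnt j (x :: t) (pvKeyN j x) : Int)).toNat
              = (i - (C.getD (pvKeyN j x) 0 - (pvCnt j t (pvKeyN j x) : Int)).toNat) + 1 := by omega
          rw [hidx, List.getD_cons_succ]
      · have hcxv : pvCnt j (x :: t) v = pvCnt j t v := by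
          rw [hcnt v, if_neg (fun e => hvx e.symm)]
          omega
        have hne : i ≠ (C.getD (pvKeyN j x) 0 - (pvCnt j (x :: t) (pvKeyN j x) : Int)).toNat := by
          rcases Nat.lt_or_ge v (pvKeyN j x) with hlt | hge2
          · have := hdisj v (pvKeyN j x) hlt hx
            omega
          · have hgt : pvKeyN j x < v := by omega
            have := hdisj (pvKeyN j x) v hgt hv
            have hc1 : (pvCnt j (x :: t) (pvKeyN j x) : Int) ≥ 1 := by rw [hcx]; push_cast; omega
            omega
        rw [List.getD_eq_getElem?_getD, List.getElem?_set_ne (fun e => hne e.symm),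
          ← List.getD_eq_getElem?_getD]
        have hfil : (x :: t).filter (fun y => pvKeyN j y == v) = t.filter (fun y => pvKeyN j y == v) := by
          rw [List.filter_cons_of_neg (by simp; exact fun e => hvx e.symm)]
        rw [hfil, hcxv]
        have hi1' : C.getD v 0 - (pvCnt j t v : Int) ≤ (i : Int) := by
          rw [← hcxv]; exact hi1
        exact ihBlk v hv i hi1' hi2
    · intro i hni
      rw [hp]
      have hblkx := hni (pvKeyN j x) hx
      have hc1 : (pvCnt j (x :: t) (pvKeyN j x) : Int) ≥ 1 := by rw [hcx]; push_cast; omega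
      have hne : i ≠ (C.getD (pvKeyN j x) 0 - (pvCnt j (x :: t) (pvKeyN j x) : Int)).toNat := by
        intro e
        apply hblkx
        have := hge (pvKeyN j x) hx
        omega
      rw [List.getD_eq_getElem?_getD, List.getElem?_set_ne (fun e => hne e.symm),
        ← List.getD_eq_getElem?_getD]
      apply ihUn
      intro v hv hblk
      apply hni v hv
      have : (pvCnt j t v : Int) ≤ (pvCnt j (x :: t) v : Int) := by
        rw [hcnt v]; split_ifs <;> push_cast <;> omega
      omega

theorem pvFlatLen (j : Int) (A : List (Int × Int × Int)) : ∀ u : Nat,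
    ((List.range u).flatMap (fun v => A.filter (fun x => pvKeyN j x == v))).length = pvSN j A u := by
  intro u
  induction u with
  | zero => simp [pvSN]
  | succ u ih =>
    rw [List.range_succ, List.flatMap_append, List.length_append, ih, pvSN_succ]
    simp [pvCnt, List.countP_eq_length_filter]

theorem pvTargetGetD (j : Int) (A : List (Int × Int × Int)) : ∀ u : Nat, ∀ v : Nat, v < u →
    ∀ i : Nat, pvSN j A v ≤ i → i < pvSN j A (v + 1) →
    ((List.range u).flatMap (fun w => A.filter (fun x => pvKeyN j x == w))).getD i (0,0,0)
      = (A.filter (fun x => pvKeyN j x == v)).getD (i - pvSN j A v) (0,0,0) := by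
  intro u
  induction u with
  | zero => omega
  | succ u ih =>
    intro v hv i h1 h2
    rw [List.range_succ, List.flatMap_append]
    rcases Nat.lt_or_ge v u with hlt | hgeu
    · have hiu : i < pvSN j A u := lt_of_lt_of_le h2 (pvSN_mono j A (by omega))
      rw [List.getD_append _ _ _ _ (by rw [pvFlatLen]; exact hiu)]
      exact ih v hlt i h1 h2
    · have hvu : v = u := by omega
      subst hvu
      rw [List.getD_append_right _ _ _ _ (by rw [pvFlatLen]; exact h1), pvFlatLen]
      simp

theorem pvCover (j : Int) (A : List (Int × Int × Int)) (i : Nat) : ∀ u : Nat, i < pvSN j A u →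
    ∃ v : Nat, v < u ∧ pvSN j A v ≤ i ∧ i < pvSN j A (v + 1) := by
  intro u
  induction u with
  | zero => simp [pvSN]
  | succ u ih =>
    intro h
    rcases Nat.lt_or_ge i (pvSN j A u) with h1 | h1
    · obtain ⟨v, hv, ha, hb⟩ := ih h1
      exact ⟨v, by omega, ha, hb⟩
    · exact ⟨u, by omega, h1, h⟩

theorem pvACountSort_eq (A : List (Int × Int × Int)) (j : Int)
    (h : ∀ x ∈ A, 0 ≤ pvGetJ x j ∧ pvGetJ x j < 10) :
    pvACountSort A j =
      (List.range 10).flatMap (fun (v : Nat) => A.filter (fun x => pvGetJ x j = (v : Int))) := by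
  have hk : ∀ x ∈ A, pvKeyN j x < 10 := by
    intro x hx
    have := h x hx
    unfold pvKeyN
    omega
  -- replace the Int-valued filter predicate by the Nat-key one
  have hpred : (List.range 10).flatMap (fun (v : Nat) => A.filter (fun x => pvGetJ x j = (v : Int)))
      = (List.range 10).flatMap (fun v => A.filter (fun x => pvKeyN j x == v)) := by
    apply List.flatMap_congr
    intro v hv
    apply List.filter_congr
    intro x hx
    have := h x hx
    unfold pvKeyN
    by_cases e : pvGetJ x j = (v : Int) <;> simp [e] <;> omega

  rw [hpred]
  unfold pvACountSort
  simp only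
  obtain ⟨hc0len, hc0get⟩ := pvCS_counts j A (List.replicate 10 0) (by
    intro x hx
    rw [List.length_replicate]
    exact hk x hx)
  set C0 : List Int := A.foldl (fun C x => C.set (pvGetJ x j).toNat (C.getD (pvGetJ x j).toNat 0 + 1))
    (List.replicate 10 (0 : Int)) with hC0
  rw [List.length_replicate] at hc0len
  have hc0get' : ∀ d : Nat, d < 10 → C0.getD d 0 = (pvCnt j A d : Int) := by
    intro d hd
    rw [hc0get d, List.getD_eq_getElem?_getD, List.getElem?_replicate, if_pos hd]
    simp
  obtain ⟨hc1len, hc1get⟩ := pvCS_prefix C0 hc0len 9 (by omega)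
  set C1 : List Int := (List.range' 1 9).foldl (fun C i => C.set i (C.getD i 0 + C.getD (i - 1) 0)) C0 with hC1
  have hc1get' : ∀ v : Nat, v < 10 → C1.getD v 0 = (pvSN j A (v + 1) : Int) := by
    intro v hv
    rw [hc1get v hv, if_pos (by omega)]
    have : ∀ d ∈ List.range (v+1), C0.getD d 0 = (pvCnt j A d : Int) := by
      intro d hd
      exact hc0get' d (by have := List.mem_range.mp hd; omega)
    rw [List.map_congr_left this]
    unfold pvSN
    push_cast
    rw [List.map_map]
    rfl
  have htotal : pvSN j A 10 = A.length := pvSN_total j A hk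
  obtain ⟨hf1, hf2, hfC, hfBlk, hfUn⟩ := pvCS_scatter j C1 (List.replicate A.length (0,0,0)) hc1len A hk
    (by
      intro v hv
      rw [hc1get' v hv, pvSN_succ]
      push_cast
      have : (0:Int) ≤ (pvSN j A v : Int) := by positivity
      omega)
    (by
      intro v hv
      rw [hc1get' v hv, List.length_replicate, ← htotal]
      have := pvSN_mono j A (show v + 1 ≤ 10 by omega)
      push_cast
      omega)
    (by
      intro v w hvw hw
      rw [hc1get' v (by omega), hc1get' w hw, pvSN_succ j A w]
      have := pvSN_mono j A (show v + 1 ≤ w by omega)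
      push_cast
      omega)
  apply List.ext_getElem
  · rw [hf2, List.length_replicate, pvFlatLen, htotal]
  · intro i hi1 hi2
    have hilen : i < A.length := by rwa [hf2, List.length_replicate] at hi1
    obtain ⟨v, hv, hb1, hb2⟩ := pvCover j A i 10 (by rwa [htotal])
    have hblk := hfBlk v hv i
      (by rw [hc1get' v hv, pvSN_succ]; push_cast; omega)
      (by rw [hc1get' v hv]; push_cast; omega)
    have htarget := pvTargetGetD j A 10 v hv i hb1 hb2
    have hidx : ((C1.getD v 0 - (pvCnt j A v : Int))).toNat = pvSN j A v := by
      rw [hc1get' v hv, pvSN_succ]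
      push_cast
      omega
    rw [hidx] at hblk
    have : ((A.foldr (fun x (st : List Int × List (Int × Int × Int)) =>
        let c := st.1.set (pvGetJ x j).toNat (st.1.getD (pvGetJ x j).toNat 0 - 1)
        (c, st.2.set (c.getD (pvGetJ x j).toNat 0).toNat x))
      (C1, List.replicate A.length (0, 0, 0))).2).getD i (0,0,0)
        = ((List.range 10).flatMap (fun w => A.filter (fun x => pvKeyN j x == w))).getD i (0,0,0) := by
      rw [hblk, htarget]
    rw [List.getD_eq_getElem?_getD, List.getD_eq_getElem?_getD,
      List.getElem?_eq_getElem hi1, List.getElem?_eq_getElem hi2] at this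
    simpa using this

-- Bool "comes strictly before" test used by sorted2 with reverse = false
def pvBef {α : Type} (k1 k2 : α → Int) (a b : α) : Bool :=
  decide (k1 a < k1 b) || (!decide (k1 b < k1 a) && decide (k2 a < k2 b))

abbrev pvLexLt (a b : Int × Int) : Prop := a.1 < b.1 ∨ (a.1 = b.1 ∧ a.2 < b.2)

theorem pvInsertBy_append {α : Type} (bef : α → α → Bool) (x : α) :
    ∀ (b l : List α), (∀ y ∈ b, bef x y = false) →
    PySem.List.insertBy bef x (b ++ l) = b ++ PySem.List.insertBy bef x l := by
  intro b
  induction b with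
  | nil => intro l _; simp
  | cons y ys ih =>
    intro l hb
    rw [List.cons_append]
    have hy : bef x y = false := hb y List.mem_cons_self
    simp only [PySem.List.insertBy, hy]
    rw [ih l (fun z hz => hb z (List.mem_cons_of_mem y hz))]
    simp

theorem pvInsertBy_front {α : Type} (bef : α → α → Bool) (x : α) :
    ∀ (l : List α), (∀ z ∈ l, bef x z = true) →
    PySem.List.insertBy bef x l = x :: l := by
  intro l hl
  cases l with
  | nil => rfl
  | cons z zs =>
    simp [PySem.List.insertBy, hl z List.mem_cons_self]

theorem pvInsert_blocks {α : Type} (k1 k2 : α → Int) (x : α) :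
    ∀ (vs : List (Int × Int)) (g : Int × Int → List α),
    vs.Pairwise pvLexLt → ((k1 x, k2 x) ∈ vs) →
    (∀ v ∈ vs, ∀ y ∈ g v, (k1 y, k2 y) = v) →
    PySem.List.insertBy (pvBef k1 k2) x (vs.flatMap g)
      = vs.flatMap (fun v => g v ++ if (k1 x, k2 x) = v then [x] else []) := by
  intro vs
  induction vs with
  | nil => intro g _ hx _; exact absurd hx (List.not_mem_nil)
  | cons v vs' ih =>
    intro g hpw hx hg
    obtain ⟨hv, hpw'⟩ := List.pairwise_cons.mp hpw
    rw [List.flatMap_cons, List.flatMap_cons]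
    by_cases hxv : (k1 x, k2 x) = v
    · have hbv : ∀ y ∈ g v, pvBef k1 k2 x y = false := by
        intro y hy
        have hkey : (k1 y, k2 y) = v := hg v List.mem_cons_self y hy
        have h1 : k1 y = k1 x := by
          have := congrArg Prod.fst hkey
          have := congrArg Prod.fst hxv
          simp_all
        have h2 : k2 y = k2 x := by
          have := congrArg Prod.snd hkey
          have := congrArg Prod.snd hxv
          simp_all
        simp [pvBef, h1, h2]
      rw [pvInsertBy_append _ _ _ _ hbv]
      have hall : ∀ z ∈ vs'.flatMap g, pvBef k1 k2 x z = true := by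
        intro z hz
        obtain ⟨w, hw, hzw⟩ := List.mem_flatMap.mp hz
        have hkey : (k1 z, k2 z) = w := hg w (List.mem_cons_of_mem v hw) z hzw
        have hlt : pvLexLt v w := hv w hw
        have e1 : k1 z = w.1 := by rw [← hkey]
        have e2 : k2 z = w.2 := by rw [← hkey]
        have f1 : k1 x = v.1 := by rw [← hxv]
        have f2 : k2 x = v.2 := by rw [← hxv]
        rcases hlt with h | ⟨h1, h2⟩
        · simp [pvBef, e1, f1]
          omega
        · simp [pvBef, e1, e2, f1, f2]
          omega
      rw [pvInsertBy_front _ _ _ hall, if_pos hxv]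
      have hifs : vs'.flatMap (fun w => g w ++ if (k1 x, k2 x) = w then [x] else [])
          = vs'.flatMap g := by
        apply List.flatMap_congr
        intro w hw
        have : (k1 x, k2 x) ≠ w := by
          intro e
          have := hv w hw
          rw [hxv] at e
          subst e
          rcases this with h | ⟨h1, h2⟩ <;> omega
        rw [if_neg this]
        simp
      rw [hifs]
      simp
    · have hx' : (k1 x, k2 x) ∈ vs' := by
        rcases List.mem_cons.mp hx with h | h
        · exact absurd h hxv
        · exact h
      have hbv : ∀ y ∈ g v, pvBef k1 k2 x y = false := by
        intro y hy
        have hkey : (k1 y, k2 y) = v := hg v List.mem_cons_self y hy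
        have hlt : pvLexLt v (k1 x, k2 x) := hv _ hx'
        have e1 : k1 y = v.1 := by rw [← hkey]
        have e2 : k2 y = v.2 := by rw [← hkey]
        rcases hlt with h | ⟨h1, h2⟩
        · simp at h
          simp [pvBef, e1, e2]
          omega
        · simp at h1 h2
          simp [pvBef, e1, e2, h1, h2]
          omega
      rw [pvInsertBy_append _ _ _ _ hbv,
        ih g hpw' hx' (fun w hw => hg w (List.mem_cons_of_mem v hw)), if_neg hxv]
      simp

theorem pvSorted2_blocks (k1 k2 : Int → Int) (vs : List (Int × Int))
    (hvs : vs.Pairwise pvLexLt) : ∀ (xs : List Int),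
    (∀ x ∈ xs, (k1 x, k2 x) ∈ vs) →
    PySem.List.sorted2 xs k1 k2 false
      = vs.flatMap (fun v => xs.filter (fun x => decide ((k1 x, k2 x) = v))) := by
  intro xs
  induction xs using List.reverseRecOn with
  | nil =>
    intro _
    have : ∀ v ∈ vs, List.filter (fun x => decide ((k1 x, k2 x) = v)) [] = [] := by
      intro v _; rfl
    rw [show PySem.List.sorted2 [] k1 k2 false = ([] : List Int) from rfl]
    rw [List.flatMap_congr this]
    simp
  | append_singleton ys x ih =>
    intro hall
    have hys : ∀ y ∈ ys, (k1 y, k2 y) ∈ vs := fun y hy => hall y (List.mem_append_left _ hy)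
    have hx : (k1 x, k2 x) ∈ vs := hall x (List.mem_append_right _ List.mem_cons_self)
    have hfold : PySem.List.sorted2 (ys ++ [x]) k1 k2 false
        = PySem.List.insertBy (pvBef k1 k2) x (PySem.List.sorted2 ys k1 k2 false) := by
      show List.foldl _ [] (ys ++ [x]) = _
      rw [List.foldl_append]
      rfl
    rw [hfold, ih hys]
    rw [pvInsert_blocks k1 k2 x vs _ hvs hx (by
      intro v hv y hy
      have := List.mem_filter.mp hy
      exact of_decide_eq_true this.2)]
    apply List.flatMap_congr
    intro v hv
    rw [List.filter_append]
    congr 1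
    by_cases h : (k1 x, k2 x) = v <;> simp [List.filter, h]


-- the fueled digit list agrees with B's digit loop below 10^f
theorem pvBDigits_eq_fuel : ∀ (f : Nat) (n : Int), n < 10 ^ f → pvBDigits n = pvPreDigits f n := by
  intro f
  induction f with
  | zero =>
    intro n hn
    have h0 : n < 1 := by simpa using hn
    have : ¬ n > 0 := by omega
    rw [pvBDigits_nonpos this]
    rfl
  | succ f ih =>
    intro n hn
    by_cases h : n > 0
    · rw [pvBDigits_pos h]
      show _ = if n > 0 then _ else _
      rw [if_pos h]
      congr 1
      apply ih
      have hd : PySem.Int.floordiv n 10 = n / 10 := PySem.Int.floordiv_eq_ediv_of_pos (by norm_num)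
      rw [hd]
      rw [Int.ediv_lt_iff_lt_mul (by norm_num)]
      calc n < 10 ^ (f + 1) := hn
        _ = 10 ^ f * 10 := by ring
    · rw [pvBDigits_nonpos h]
      show _ = if n > 0 then _ else _
      rw [if_neg h]

theorem pvPreUniq_eq (n : Int) (hn : n ≤ 2147483648) : pvPreUniq n = pvBUniq n := by
  unfold pvPreUniq pvBUniq
  rw [pvBDigits_eq_fuel 11 n (by norm_num; omega)]

theorem pvPreRep_eq (n : Int) (hn : n ≤ 2147483648) : pvPreRep n = pvBRep n := by
  unfold pvPreRep pvBRep
  rw [pvBDigits_eq_fuel 11 n (by norm_num; omega)]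

theorem pvBUniq_bounds (n : Int) : 0 ≤ pvBUniq n ∧ pvBUniq n ≤ 10 := by
  unfold pvBUniq
  have := List.countP_le_length
    (p := fun (d : Nat) => (pvBDigits n).count (d : Int) == 1) (l := List.range 10)
  constructor
  · positivity
  · simp at this
    omega

theorem pvBRep_bounds (n : Int) : 0 ≤ pvBRep n ∧ pvBRep n ≤ 10 := by
  unfold pvBRep
  have := List.countP_le_length
    (p := fun (d : Nat) => decide (1 < (pvBDigits n).count (d : Int))) (l := List.range 10)
  constructor
  · positivity
  · simp at this
    omega


-- the lexicographically ascending enumeration of all key pairs (-uniq, rep)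
def pvVS : List (Int × Int) :=
  (List.range 10).flatMap (fun (a : Nat) => (List.range 10).map (fun (b : Nat) => ((a : Int) - 9, (b : Int))))

theorem pvVS_pairwise : pvVS.Pairwise pvLexLt := by decide

-- ===== VERDICT (by name: the statement is the Claim_ definition above) =====
theorem pretty_sort_spec : Claim_equal_pretty_sort := by
  intro T hdom hpre
  unfold Spec_pretty_sort
  -- bounds on the two digit-count keys, from Dom_ and Pre_
  have hdom' : ∀ n ∈ T, n ≤ 2147483648 := by
    intro n hn
    have := List.all_eq_true.mp hdom n hn
    simp [pvDomInt] at this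
    omega
  have hu : ∀ n ∈ T, 0 ≤ pvBUniq n ∧ pvBUniq n ≤ 9 := by
    intro n hn
    have h1 := pvBUniq_bounds n
    have h2 := (hpre n hn).1
    rw [pvPreUniq_eq n (hdom' n hn)] at h2
    omega
  have hr : ∀ n ∈ T, 0 ≤ pvBRep n ∧ pvBRep n ≤ 9 := by
    intro n hn
    have h1 := pvBRep_bounds n
    have h2 := (hpre n hn).2
    rw [pvPreRep_eq n (hdom' n hn)] at h2
    omega
  -- A's pipeline, rewritten stage by stage into nested blocks
  have hA0 : pretty_sort T =
      (pvSwapLoop (pvACountSort (pvSwapLoop (pvACountSort (pvAPreprocessing T) 1)) 0)).map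
        (fun x => x.2.2) := rfl
  rw [hA0, pvAPreprocessing_eq]
  set tup : Int → Int × Int × Int := fun t => (pvBUniq t, pvBRep t, t) with htup
  have hkey0 : ∀ n, pvGetJ (tup n) 0 = pvBUniq n := fun n => rfl
  have hkey1 : ∀ n, pvGetJ (tup n) 1 = pvBRep n := fun n => rfl
  have hb1 : ∀ x ∈ T.map tup, 0 ≤ pvGetJ x 1 ∧ pvGetJ x 1 < 10 := by
    intro x hx
    obtain ⟨t, ht, rfl⟩ := List.mem_map.mp hx
    rw [hkey1]
    have := hr t ht
    omega
  have e1 := pvACountSort_eq (T.map tup) 1 hb1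
  have hmem1 : ∀ x ∈ (pvACountSort (T.map tup) 1).reverse, x ∈ T.map tup := by
    rw [e1]
    intro x hx
    rw [List.mem_reverse] at hx
    obtain ⟨v, _, hxf⟩ := List.mem_flatMap.mp hx
    exact (List.mem_filter.mp hxf).1
  have hb0 : ∀ x ∈ (pvACountSort (T.map tup) 1).reverse, 0 ≤ pvGetJ x 0 ∧ pvGetJ x 0 < 10 := by
    intro x hx
    obtain ⟨t, ht, rfl⟩ := List.mem_map.mp (hmem1 x hx)
    rw [hkey0]
    have := hu t ht
    omega
  rw [pvSwapLoop_eq_reverse, pvSwapLoop_eq_reverse, pvACountSort_eq _ 0 hb0]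
  have main : ∀ L : List (Int × Int × Int),
      ((List.range 10).flatMap (fun (v : Nat) =>
          (L.reverse).filter (fun x => decide (pvGetJ x 0 = (v : Int))))).reverse
        = (List.range 10).reverse.flatMap (fun (v : Nat) =>
            L.filter (fun x => decide (pvGetJ x 0 = (v : Int)))) := by
    intro L
    rw [List.reverse_flatMap]
    apply List.flatMap_congr
    intro a _
    simp only [Function.comp]
    rw [List.filter_reverse, List.reverse_reverse]
  rw [main, e1, List.map_flatMap]
  have hstep2 : ∀ a : Nat,
      ((((List.range 10).flatMap (fun (v : Nat) =>
            (T.map tup).filter (fun x => decide (pvGetJ x 1 = (v : Int))))).filter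
          (fun x => decide (pvGetJ x 0 = (a : Int)))).map (fun x => x.2.2))
      = (List.range 10).flatMap (fun (b : Nat) =>
          T.filter (fun n => decide (pvBUniq n = (a : Int)) && decide (pvBRep n = (b : Int)))) := by
    intro a
    rw [List.filter_flatMap, List.map_flatMap]
    apply List.flatMap_congr
    intro b _
    rw [List.filter_filter, List.filter_map, List.map_map]
    have : ((fun x => x.2.2) ∘ tup) = id := rfl
    rw [this, List.map_id]
    apply List.filter_congr
    intro n _
    simp only [Function.comp, hkey0, hkey1]
  rw [List.flatMap_congr (fun a _ => hstep2 a)]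
  -- B's sort as blocks over the key enumeration
  have hvsmem : ∀ n ∈ T, ((fun n => -(pvBUniq n)) n, (fun n => pvBRep n) n) ∈ pvVS := by
    intro n hn
    have h1 := hu n hn
    have h2 := hr n hn
    simp only [pvVS, List.mem_flatMap, List.mem_map, List.mem_range]
    obtain ⟨uN, huN⟩ : ∃ uN : Nat, pvBUniq n = (uN : Int) := ⟨_, rfl⟩
    obtain ⟨rN, hrN⟩ : ∃ rN : Nat, pvBRep n = (rN : Int) := ⟨_, rfl⟩
    refine ⟨9 - uN, by omega, rN, by omega, ?_⟩
    rw [Prod.mk.injEq]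
    constructor <;> omega
  rw [show pretty_sort_alt T
        = PySem.List.sorted2 T (fun n => -(pvBUniq n)) (fun n => pvBRep n) false from rfl,
    pvSorted2_blocks _ _ pvVS pvVS_pairwise T hvsmem]
  -- B's side: flatten the pair enumeration
  rw [show pvVS = (List.range 10).flatMap
        (fun (a : Nat) => (List.range 10).map (fun (b : Nat) => ((a : Int) - 9, (b : Int)))) from rfl,
    List.flatMap_assoc]
  have hstep4 : ∀ a : Nat,
      (((List.range 10).map (fun (b : Nat) => ((a : Int) - 9, (b : Int)))).flatMap (fun v =>
        T.filter (fun x => decide ((-(pvBUniq x), pvBRep x) = v))))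
      = (List.range 10).flatMap (fun (b : Nat) =>
          T.filter (fun x => decide ((-(pvBUniq x), pvBRep x) = ((a : Int) - 9, (b : Int))))) := by
    intro a
    rw [List.flatMap_map]
  rw [List.flatMap_congr (fun a _ => hstep4 a)]
  -- outer index: [9,...,0] = map (9 - ·) [0,...,9]
  rw [show (List.range 10).reverse = (List.range 10).map (fun a => 9 - a) from by decide,
    List.flatMap_map]
  apply List.flatMap_congr
  intro a ha
  have ha10 : a < 10 := List.mem_range.mp ha
  apply List.flatMap_congr
  intro b _
  apply List.filter_congr
  intro n _
  have hc : ((9 - a : Nat) : Int) = 9 - (a : Int) := by omega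
  rw [hc]
  by_cases e1 : pvBUniq n = 9 - (a : Int) <;> by_cases e2 : pvBRep n = (b : Int) <;>
    simp [e1, e2, Prod.ext_iff] <;> omega
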